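-- pv_equiv track=rewrite | github.com/qsantos/advent-of-code | 2016/day06/main.py | least_common
-- ===== SOURCE A (Python) =====
-- from collections import Counter
-- from typing import List
--
-- def least_common(messages: List[str]) -> str:
--     n = len(messages[0])
--     assert all(len(message) == n for message in messages)
--     ret = []
--     for i in range(n):
--         c, _ = list(Counter(message[i] for message in messages).most_common())[-1]
--         ret.append(c)
--     return ''.join(ret)
-- ===== SOURCE B (Python) =====
-- from typing import List
--
-- def least_common(messages: List[str]) -> str:
--     n = len(messages[0])
--     assert all(len(message) == n for message in messages)
--     counters = [{} for _ in range(n)]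
--     for message in messages:
--         for i, ch in enumerate(message):
--             counters[i][ch] = counters[i].get(ch, 0) + 1
--     out = []
--     for counter in counters:
--         best = None
--         for ch, cnt in counter.items():
--             if best is None or cnt <= best[1]:
--                 best = (ch, cnt)
--         out.append(best[0])
--     return ''.join(out)
-- ===== Notes on version B (the rewrite author's own statement) =====
-- stated objective: alternative
-- what changed: A rebuilds a Counter per column (column-outer, rescanning all messages n times) and sorts it with most_common(); B makes one row-major pass filling n plain dicts and then extracts each column's least-common entry with a single linear last-minimum scan, with no Counter and no sorting.
import Mathlib
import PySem

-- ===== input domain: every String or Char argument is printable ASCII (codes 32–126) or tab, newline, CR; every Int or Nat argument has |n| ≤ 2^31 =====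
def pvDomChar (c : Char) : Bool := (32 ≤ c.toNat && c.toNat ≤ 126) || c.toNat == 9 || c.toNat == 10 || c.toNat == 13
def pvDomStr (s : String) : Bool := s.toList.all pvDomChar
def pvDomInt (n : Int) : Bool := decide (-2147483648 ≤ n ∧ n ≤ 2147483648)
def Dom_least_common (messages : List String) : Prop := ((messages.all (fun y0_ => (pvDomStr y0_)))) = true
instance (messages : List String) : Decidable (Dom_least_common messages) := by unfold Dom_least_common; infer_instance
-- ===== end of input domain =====

-- B replaces A's column-outer Counter+most_common() rescans by one row-major counting pass
-- over plain dicts plus a linear last-minimum extraction per column (no sort).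

-- ===== PORT A =====
-- port of: c, _ = list(Counter(...).most_common())[-1]  — most_common() is
-- sorted(items, key=count, reverse=True) (stable); [-1] is the last element.
def least_common (messages : List String) : String :=
  match messages with
  | [] => ""          -- messages[0] raises IndexError; excluded by Pre_
  | m0 :: _ =>
    let n : Nat := m0.toList.length
    -- assert all(len(message) == n ...): raises on unequal lengths; excluded by Pre_
    let ret : List Char := (PySem.List.pyRange 0 (n : Int) 1).foldl (fun ret i =>
      let d := PySem.Dict.counter (messages.map (fun message => PySem.List.pyGetD message.toList i ' '))
      let mc := PySem.List.sorted d.items (fun kv => kv.2) true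
      ret ++ [((mc.getLast?).map Prod.fst).getD ' ']) []
    String.mk ret

-- ===== PORT B =====
-- counters[i][ch] = counters[i].get(ch, 0) + 1
def pvUpd (d : PySem.Dict Char Int) (ch : Char) : PySem.Dict Char Int :=
  d.insert ch (d.getD ch 0 + 1)

-- for i, ch in enumerate(message): counters[i][ch] = counters[i].get(ch, 0) + 1
def pvRowStep (cs : List (PySem.Dict Char Int)) (message : String) : List (PySem.Dict Char Int) :=
  (PySem.List.enumerate message.toList 0).foldl
    (fun cs p => cs.set p.1.toNat (pvUpd (cs.getD p.1.toNat PySem.Dict.empty) p.2)) cs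

-- best = None; for ch, cnt in counter.items(): if best is None or cnt <= best[1]: best = (ch, cnt)
def pvPick (items : List (Char × Int)) : Option (Char × Int) :=
  items.foldl (fun best kv =>
    match best with
    | none => some kv
    | some p => if kv.2 ≤ p.2 then some kv else some p) none

def least_common_alt (messages : List String) : String :=
  match messages with
  | [] => ""          -- len(messages[0]) raises IndexError; excluded by Pre_
  | m0 :: _ =>
    let n : Nat := m0.toList.length
    -- assert as in Source B: raises on unequal lengths; excluded by Pre_
    let counters := messages.foldl pvRowStep (List.replicate n PySem.Dict.empty)
    let out : List Char := counters.foldl (fun out counter =>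
      out ++ [((pvPick counter.items).map Prod.fst).getD ' ']) []
    String.mk out

-- ===== PRECONDITION & SPEC =====
-- Pre_ excludes exactly the inputs on which A raises: the empty list (IndexError on
-- messages[0]) and lists with messages of unequal length (the assert fails).
def Pre_least_common (messages : List String) : Prop :=
  messages ≠ [] ∧ ∀ m ∈ messages, PySem.Str.len m = PySem.Str.len (messages.headD "")
instance (messages : List String) : Decidable (Pre_least_common messages) := by
  unfold Pre_least_common; infer_instance
def pvWitness_least_common : List String := ["aba", "bab", "aba"]

def Spec_least_common (messages : List String) (out : String) : Prop := out = least_common_alt messages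
instance (messages : List String) (out : String) : Decidable (Spec_least_common messages out) := by unfold Spec_least_common; infer_instance

-- ===== CLAIM (what is proved, stated in full; the proofs are below) =====
def Claim_equal_least_common : Prop := ∀ (messages : List String), Dom_least_common messages → Pre_least_common messages → Spec_least_common messages (least_common messages)

-- ===== LEMMAS AND PROOFS =====

-- getLast? of an insertion step: if x goes past everything it lands at the end.
theorem pv_insertBy_getLast? {α : Type} (before : α → α → Bool) (x : α) (s : List α) :
    (PySem.List.insertBy before x s).getLast? =
      if s.any (before x) then s.getLast? else some x := by
  induction s with
  | nil => simp [PySem.List.insertBy]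
  | cons y ys ih =>
    by_cases h : before x y
    · simp [PySem.List.insertBy, h, List.getLast?_cons_cons]
    · have hne : PySem.List.insertBy before x ys ≠ [] := by
        cases ys <;> simp [PySem.List.insertBy] <;> split <;> simp
      rw [show PySem.List.insertBy before x (y :: ys) = y :: PySem.List.insertBy before x ys from by
        simp [PySem.List.insertBy, h]]
      rcases List.exists_cons_of_ne_nil hne with ⟨a, t, he⟩
      rw [he, List.getLast?_cons_cons, ← he, ih]
      by_cases ha : ys.any (before x)
      · have hys : ys ≠ [] := by cases ys <;> simp_all
        rcases List.exists_cons_of_ne_nil hys with ⟨b, u, hb⟩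
        simp [List.any_cons, h, hb, List.getLast?_cons_cons]
      · simp [List.any_cons, h, ha]

theorem pv_pairwise_getLast {α : Type} {R : α → α → Prop} :
    ∀ (s : List α) (p : α), s.Pairwise R → s.getLast? = some p →
      ∀ y ∈ s, y = p ∨ R y p := by
  intro s
  induction s with
  | nil => simp
  | cons a t ih =>
    intro p hpw hl y hy
    cases t with
    | nil =>
      simp at hl hy; subst hl; subst hy; left; rfl
    | cons b u =>
      have hl' : (b :: u).getLast? = some p := by
        simpa [List.getLast?_cons_cons] using hl
      rcases List.mem_cons.1 hy with rfl | hy'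
      · right
        have hp : p ∈ b :: u := List.mem_of_getLast? hl'
        exact (List.pairwise_cons.1 hpw).1 p hp
      · exact ih p (List.pairwise_cons.1 hpw).2 hl' y hy'

-- Last element of Python's stable descending sort by count = B's last-minimum scan.
theorem pv_sorted_last_eq_pick (l : List (Char × Int)) :
    (PySem.List.sorted l (fun kv => kv.2) true).getLast? = pvPick l := by
  induction l using List.reverseRecOn with
  | nil => simp [PySem.List.sorted, pvPick]
  | append_singleton l x ih =>
    have hs : PySem.List.sorted (l ++ [x]) (fun kv => kv.2) true =
        PySem.List.insertBy (fun a b => decide (b.2 < a.2)) x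
          (PySem.List.sorted l (fun kv => kv.2) true) := by
      rw [PySem.List.sorted_rev_eq_foldl_insertBy, PySem.List.sorted_rev_eq_foldl_insertBy,
        List.foldl_append]
      rfl
    have hpick : pvPick (l ++ [x]) =
        (match pvPick l with
         | none => some x
         | some p => if x.2 ≤ p.2 then some x else some p) := by
      simp [pvPick, List.foldl_append]
    rw [hs, pv_insertBy_getLast?, hpick, ← ih]
    cases hlast : (PySem.List.sorted l (fun kv => kv.2) true).getLast? with
    | none =>
      have hnil : PySem.List.sorted l (fun kv => kv.2) true = [] :=
        List.getLast?_eq_none_iff.mp hlast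
      rw [hnil]; simp
    | some p =>
      have hmem : p ∈ PySem.List.sorted l (fun kv => kv.2) true := List.mem_of_getLast? hlast
      have hpw := PySem.List.sorted_pairwise_rev l (fun kv => kv.2)
      have hmin : ∀ y ∈ PySem.List.sorted l (fun kv => kv.2) true, p.2 ≤ y.2 := by
        intro y hy
        rcases pv_pairwise_getLast _ p hpw hlast y hy with rfl | h
        · exact le_refl _
        · exact h
      by_cases hle : x.2 ≤ p.2
      · have hany : (PySem.List.sorted l (fun kv => kv.2) true).any (fun y => decide (y.2 < x.2)) = false := by
          rw [List.any_eq_false]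
          intro y hy
          have hxy := le_trans hle (hmin y hy)
          simpa using not_lt.mpr hxy
        simp [hany, hle]
      · have hany : (PySem.List.sorted l (fun kv => kv.2) true).any (fun y => decide (y.2 < x.2)) = true := by
          refine List.any_eq_true.2 ⟨p, hmem, ?_⟩
          simp; omega
        simp [hany, hle]

-- set preserves length through the enumerate fold.
theorem pv_rowStep_length (m : String) (cs : List (PySem.Dict Char Int)) :
    (pvRowStep cs m).length = cs.length := by
  unfold pvRowStep
  generalize m.toList = xs
  generalize (0 : Int) = k
  induction xs generalizing k cs with
  | nil => simp [PySem.List.enumerate]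
  | cons x t ih =>
    simp only [PySem.List.enumerate, List.foldl_cons]
    rw [ih]
    simp

-- One row's effect on the i-th counter.
theorem pv_row_getD (xs : List Char) :
    ∀ (k : Nat) (cs : List (PySem.Dict Char Int)) (i : Nat),
      k + xs.length ≤ cs.length →
      ((PySem.List.enumerate xs (k : Int)).foldl
          (fun cs p => cs.set p.1.toNat (pvUpd (cs.getD p.1.toNat PySem.Dict.empty) p.2)) cs).getD i PySem.Dict.empty =
        if k ≤ i ∧ i < k + xs.length then pvUpd (cs.getD i PySem.Dict.empty) (xs.getD (i - k) ' ')
        else cs.getD i PySem.Dict.empty := by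
  induction xs with
  | nil => intro k cs i h; simp [PySem.List.enumerate]
  | cons x t ih =>
    intro k cs i h
    have hk : k < cs.length := by simp at h; omega
    simp only [PySem.List.enumerate, List.foldl_cons]
    have hcast : ((k : Int) + 1) = ((k + 1 : Nat) : Int) := by push_cast; ring
    rw [hcast]
    have hset : ((k : Int)).toNat = k := by simp
    rw [hset]
    set cs' := cs.set k (pvUpd (cs.getD k PySem.Dict.empty) x) with hcs'
    have hlen' : cs'.length = cs.length := by simp [hcs']
    rw [ih (k + 1) cs' i (by simp at h ⊢; omega)]
    have hgd : ∀ j, cs'.getD j PySem.Dict.empty =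
        if j = k then pvUpd (cs.getD k PySem.Dict.empty) x else cs.getD j PySem.Dict.empty := by
      intro j
      by_cases hj : j = k
      · subst hj
        rw [if_pos rfl, hcs', List.getD_eq_getElem?_getD, List.getElem?_set_self',
          List.getElem?_eq_getElem hk]
        simp [List.getD_eq_getElem?_getD, List.getElem?_eq_getElem hk]
      · rw [if_neg hj, hcs', List.getD_eq_getElem?_getD, List.getElem?_set_ne (Ne.symm hj),
          ← List.getD_eq_getElem?_getD]
    by_cases hik : i = k
    · subst hik
      rw [if_neg (by omega)]
      rw [hgd i, if_pos rfl, if_pos (by simp)]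
      simp
    · rw [hgd i, if_neg hik]
      have harith : (k + 1 ≤ i ∧ i < k + 1 + t.length) ↔ (k ≤ i ∧ i < k + (x :: t).length) := by
        simp; omega
      by_cases hr : k + 1 ≤ i ∧ i < k + 1 + t.length
      · rw [if_pos hr, if_pos (harith.1 hr)]
        have : i - k = (i - (k + 1)) + 1 := by omega
        simp [this]
      · rw [if_neg hr, if_neg (by rw [← harith]; exact hr)]

-- The i-th counter after the row-major pass = the column fold of A.
theorem pv_transpose (msgs : List String) :
    ∀ (cs : List (PySem.Dict Char Int)) (i : Nat), i < cs.length →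
      (∀ m ∈ msgs, m.toList.length = cs.length) →
      (msgs.foldl pvRowStep cs).getD i PySem.Dict.empty =
        msgs.foldl (fun d m => pvUpd d (m.toList.getD i ' ')) (cs.getD i PySem.Dict.empty) := by
  induction msgs with
  | nil => intro cs i hi hlen; simp
  | cons m rest ih =>
    intro cs i hi hlen
    simp only [List.foldl_cons]
    have hm : m.toList.length = cs.length := hlen m (by simp)
    have h1 : (pvRowStep cs m).getD i PySem.Dict.empty =
        pvUpd (cs.getD i PySem.Dict.empty) (m.toList.getD i ' ') := by
      unfold pvRowStep
      rw [show (0 : Int) = ((0 : Nat) : Int) by simp]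
      rw [pv_row_getD m.toList 0 cs i (by omega)]
      rw [if_pos (by omega)]
      simp
    rw [ih (pvRowStep cs m) i (by rw [pv_rowStep_length]; exact hi)
        (fun m' hm' => by rw [pv_rowStep_length]; exact hlen m' (by simp [hm']))]
    rw [h1]

-- length is preserved through the whole row-major pass.
theorem pv_counters_length (msgs : List String) :
    ∀ cs : List (PySem.Dict Char Int), (msgs.foldl pvRowStep cs).length = cs.length := by
  induction msgs with
  | nil => intro cs; simp
  | cons m rest ih => intro cs; simp only [List.foldl_cons]; rw [ih, pv_rowStep_length]

-- ===== VERDICT (by name: the statement is the Claim_ definition above) =====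
theorem least_common_spec : Claim_equal_least_common := by
  intro messages _ hpre
  unfold Spec_least_common
  obtain ⟨hne, hlen⟩ := hpre
  match messages, hne with
  | m0 :: rest, _ =>
    have hlen' : ∀ m ∈ m0 :: rest, m.toList.length = m0.toList.length := by
      intro m hm
      have := hlen m hm
      simp only [List.headD_cons, PySem.Str.len_eq] at this
      exact_mod_cast this
    simp only [least_common, least_common_alt]
    rw [PySem.List.foldl_append_singleton_eq_map, PySem.List.foldl_append_singleton_eq_map,
      List.nil_append, List.nil_append]
    congr 1
    rw [PySem.List.pyRange_zero_natCast, List.map_map]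
    set msgs := m0 :: rest with hmsgs
    set n := m0.toList.length with hn
    set counters := msgs.foldl pvRowStep (List.replicate n PySem.Dict.empty) with hcounters
    have hclen : counters.length = n := by
      rw [hcounters, pv_counters_length]; simp
    apply List.ext_getElem
    · simp [hclen]
    · intro i h1 h2
      simp only [List.getElem_map, List.getElem_range]
      have hi : i < n := by simpa using h1
      have hci : counters[i] = counters.getD i PySem.Dict.empty := by
        rw [List.getD_eq_getElem counters PySem.Dict.empty (by omega)]
      have htr : counters.getD i PySem.Dict.empty =
          msgs.foldl (fun d m => pvUpd d (m.toList.getD i ' ')) PySem.Dict.empty := by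
        rw [hcounters, pv_transpose msgs (List.replicate n PySem.Dict.empty) i (by simpa using hi)
          (by intro m hm; rw [List.length_replicate]; exact hlen' m hm)]
        simp
      have hcol : counters[i] = PySem.Dict.counter (msgs.map (fun m => m.toList.getD i ' ')) := by
        rw [hci, htr, ← PySem.Dict.foldl_insert_getD_add_one_eq_counter, List.foldl_map]
        rfl
      simp only [Function.comp_apply, PySem.List.pyGetD_natCast]
      rw [hcol, pv_sorted_last_eq_pick]
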